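-- pv_equiv track=rewrite | github.com/Aniloid2/SemRoDe-MacroAdversarialTraining | src/TextAttack/textattack/search_methods/micro_search_batchwise.py | gen_indexes
-- ===== SOURCE A (Python) =====
-- def gen_indexes(list1, list2):
--     list1_to_list2 = {}
--     list2_to_list1 = {}
--
--     list1_indexes = {word: [] for word in list1}
--     list2_indexes = {word: [] for word in list2}
--
--     for i, word in enumerate(list1):
--         list1_indexes[word].append(i)
--
--     for i, word in enumerate(list2):
--         list2_indexes[word].append(i)
--
--     for word in list1_indexes:
--         if word in list2_indexes:
--             for idx1 in list1_indexes[word]: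
--                 if list2_indexes[word]:
--                     idx2 = list2_indexes[word].pop(0)
--                     list1_to_list2[idx1] = idx2
--                     list2_to_list1[idx2] = idx1
--     return list1_to_list2, list2_to_list1
-- ===== SOURCE B (Python) =====
-- def gen_indexes(list1, list2):
--     list1_to_list2 = {}
--     list2_to_list1 = {}
--     seen = set()
--     for word in list1:
--         if word in seen:
--             continue
--         seen.add(word)
--         occ1 = [i for i, x in enumerate(list1) if x == word]
--         occ2 = [j for j, x in enumerate(list2) if x == word]
--         for i, j in zip(occ1, occ2):
--             list1_to_list2[i] = j
--             list2_to_list1[j] = i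
--     return list1_to_list2, list2_to_list1
-- ===== Notes on version B (the rewrite author's own statement) =====
-- stated objective: simpler
-- what changed: Drops A's index-table machinery entirely: instead of building two word->positions dicts (init pass plus append pass each) and a key loop with a membership guard and destructive pop(0), B makes one pass over list1 with a seen-set and, per new word, computes its occurrence positions in both lists with two comprehensions and zips them.
import Mathlib
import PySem

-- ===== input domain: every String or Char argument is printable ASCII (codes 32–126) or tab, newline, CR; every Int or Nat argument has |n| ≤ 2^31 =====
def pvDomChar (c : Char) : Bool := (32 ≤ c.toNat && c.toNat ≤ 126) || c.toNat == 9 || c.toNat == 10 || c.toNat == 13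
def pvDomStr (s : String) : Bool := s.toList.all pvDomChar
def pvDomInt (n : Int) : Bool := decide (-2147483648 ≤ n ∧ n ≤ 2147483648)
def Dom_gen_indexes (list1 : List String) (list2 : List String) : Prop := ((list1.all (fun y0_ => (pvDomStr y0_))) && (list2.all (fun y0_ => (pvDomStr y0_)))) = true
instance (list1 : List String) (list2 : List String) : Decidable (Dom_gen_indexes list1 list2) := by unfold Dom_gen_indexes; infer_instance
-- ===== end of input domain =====

-- B builds no index tables at all: one pass over list1 with a 'seen' set, and for each new word
-- two comprehensions give its occurrence positions in each list, paired by zip (objective: simpler).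

-- ===== PORT A =====
def gen_indexes (list1 : List String) (list2 : List String) : (List (Int × Int)) × (List (Int × Int)) :=
  let list1_to_list2 : PySem.Dict Int Int := PySem.Dict.empty
  let list2_to_list1 : PySem.Dict Int Int := PySem.Dict.empty
  -- {word: [] for word in list1}, then the append pass (the key is always present, so [word].append(i) is a modify)
  let list1_indexes : PySem.Dict String (List Int) :=
    (PySem.List.enumerate list1).foldl (fun d p => d.modify p.2 [] (fun v => v ++ [p.1]))
      (list1.foldl (fun d word => d.insert word []) PySem.Dict.empty)
  let list2_indexes : PySem.Dict String (List Int) :=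
    (PySem.List.enumerate list2).foldl (fun d p => d.modify p.2 [] (fun v => v ++ [p.1]))
      (list2.foldl (fun d word => d.insert word []) PySem.Dict.empty)
  -- for word in list1_indexes: if word in list2_indexes: for idx1 …: if list2_indexes[word]: pop(0) …
  let st :=
    list1_indexes.keys.foldl
      (fun (st : PySem.Dict String (List Int) × PySem.Dict Int Int × PySem.Dict Int Int) word =>
        if st.1.contains word then
          (list1_indexes.getD word []).foldl
            (fun st idx1 =>
              match st.1.getD word [] with
              | [] => st
              | idx2 :: rest => (st.1.insert word rest, st.2.1.insert idx1 idx2, st.2.2.insert idx2 idx1))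
            st
        else st)
      (list2_indexes, list1_to_list2, list2_to_list1)
  (st.2.1.items, st.2.2.items)

-- ===== PORT B =====
def gen_indexes_alt (list1 : List String) (list2 : List String) : (List (Int × Int)) × (List (Int × Int)) :=
  -- seen = set(); for word in list1: skip if seen, else seen.add(word); two comprehensions; zip
  let st :=
    list1.foldl
      (fun (st : PySem.Set String × PySem.Dict Int Int × PySem.Dict Int Int) word =>
        if PySem.Set.contains st.1 word then st
        else
          let occ1 := (PySem.List.enumerate list1).filterMap
            (fun p => if p.2 == word then some p.1 else none)
          let occ2 := (PySem.List.enumerate list2).filterMap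
            (fun p => if p.2 == word then some p.1 else none)
          (PySem.Set.add st.1 word,
            (occ1.zip occ2).foldl
              (fun m ij => (m.1.insert ij.1 ij.2, m.2.insert ij.2 ij.1)) st.2))
      (PySem.Set.empty, PySem.Dict.empty, PySem.Dict.empty)
  (st.2.1.items, st.2.2.items)

-- ===== PRECONDITION & SPEC =====
def Spec_gen_indexes (list1 : List String) (list2 : List String) (out : (List (Int × Int)) × (List (Int × Int))) : Prop := out = gen_indexes_alt list1 list2
instance (list1 : List String) (list2 : List String) (out : (List (Int × Int)) × (List (Int × Int))) : Decidable (Spec_gen_indexes list1 list2 out) := by unfold Spec_gen_indexes; infer_instance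

-- ===== CLAIM (what is proved, stated in full; the proofs are below) =====
def Claim_equal_gen_indexes : Prop := ∀ (list1 : List String) (list2 : List String), Dom_gen_indexes list1 list2 → Spec_gen_indexes list1 list2 (gen_indexes list1 list2)

-- ===== LEMMAS AND PROOFS =====

-- occurrence positions of w, as B's comprehension computes them
def giOcc (l : List String) (w : String) : List Int :=
  (PySem.List.enumerate l).filterMap (fun p => if p.2 == w then some p.1 else none)

theorem giOcc_def (l : List String) (w : String) :
    giOcc l w = (PySem.List.enumerate l).filterMap (fun p => if p.2 == w then some p.1 else none) := rfl

theorem gi_getD_init (l : List String) :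
    ∀ (d : PySem.Dict String (List Int)), (∀ c, d.getD c [] = []) →
      ∀ c, (l.foldl (fun d word => d.insert word []) d).getD c [] = [] := by
  induction l with
  | nil => intro d h c; simpa using h c
  | cons w t ih =>
    intro d h c
    simp only [List.foldl_cons]
    apply ih
    intro c'
    rw [PySem.Dict.getD_insert]
    split_ifs with h' <;> simp [h c']

theorem gi_update_self (l : List String) :
    PySem.Set.update (PySem.Set.ofList l) l = PySem.Set.ofList l := by
  rw [PySem.Set.update_eq_append_filter]
  have : (PySem.Set.ofList l).filter (fun y => !(PySem.Set.ofList l).contains y) = [] := by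
    rw [List.filter_eq_nil_iff]
    intro y hy
    simp
    exact (PySem.Set.mem_ofList _ _).mp hy
  rw [this, List.append_nil]

-- A's init-then-append table building equals the plain enumerate-modify fold
theorem gi_build_eq (l : List String) :
    (PySem.List.enumerate l).foldl (fun d p => d.modify p.2 [] (fun v => v ++ [p.1]))
      (l.foldl (fun d word => d.insert word ([] : List Int)) PySem.Dict.empty)
    = (PySem.List.enumerate l).foldl (fun d p => d.modify p.2 [] (fun v => v ++ [p.1])) PySem.Dict.empty := by
  have hinit : ∀ c, ((l.foldl (fun d word => d.insert word ([] : List Int)) PySem.Dict.empty)).getD c [] = [] :=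
    gi_getD_init l _ (by intro c; simp [PySem.Dict.getD_empty])
  have hndI : ((l.foldl (fun d word => d.insert word ([] : List Int)) PySem.Dict.empty)).keys.Nodup :=
    PySem.Dict.nodup_keys_foldl_insert l (fun _ _ => []) PySem.Dict.empty PySem.Dict.nodup_keys_empty
  have hndA : ((PySem.List.enumerate l).foldl (fun d p => d.modify p.2 [] (fun v => v ++ [p.1]))
      (l.foldl (fun d word => d.insert word ([] : List Int)) PySem.Dict.empty)).keys.Nodup :=
    PySem.Dict.nodup_keys_foldl_modify_key (PySem.List.enumerate l) (fun p => p.2) []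
      (fun _ p v => v ++ [p.1]) _ hndI
  have hndB : ((PySem.List.enumerate l).foldl (fun d p => d.modify p.2 [] (fun v => v ++ [p.1]))
      (PySem.Dict.empty : PySem.Dict String (List Int))).keys.Nodup :=
    PySem.Dict.nodup_keys_foldl_modify_key (PySem.List.enumerate l) (fun p => p.2) []
      (fun _ p v => v ++ [p.1]) _ PySem.Dict.nodup_keys_empty
  have hkA : ((PySem.List.enumerate l).foldl (fun d p => d.modify p.2 [] (fun v => v ++ [p.1]))
        (l.foldl (fun d word => d.insert word ([] : List Int)) PySem.Dict.empty)).keys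
      = PySem.Set.update ((l.foldl (fun d word => d.insert word ([] : List Int)) PySem.Dict.empty)).keys
          ((PySem.List.enumerate l).map (fun p => p.2)) :=
    PySem.Dict.keys_foldl_modify_key (PySem.List.enumerate l) (fun p => p.2) []
      (fun _ p v => v ++ [p.1]) _
  have hkB : ((PySem.List.enumerate l).foldl (fun d p => d.modify p.2 [] (fun v => v ++ [p.1]))
        (PySem.Dict.empty : PySem.Dict String (List Int))).keys
      = PySem.Set.update (PySem.Dict.empty : PySem.Dict String (List Int)).keys
          ((PySem.List.enumerate l).map (fun p => p.2)) :=
    PySem.Dict.keys_foldl_modify_key (PySem.List.enumerate l) (fun p => p.2) []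
      (fun _ p v => v ++ [p.1]) _
  have hkI : ((l.foldl (fun d word => d.insert word ([] : List Int)) PySem.Dict.empty)).keys
      = PySem.Set.update (PySem.Dict.empty : PySem.Dict String (List Int)).keys l :=
    PySem.Dict.keys_foldl_insert l (fun _ _ => []) _
  have hkeys : ((PySem.List.enumerate l).foldl (fun d p => d.modify p.2 [] (fun v => v ++ [p.1]))
      (l.foldl (fun d word => d.insert word ([] : List Int)) PySem.Dict.empty)).keys
      = ((PySem.List.enumerate l).foldl (fun d p => d.modify p.2 [] (fun v => v ++ [p.1]))
      (PySem.Dict.empty : PySem.Dict String (List Int))).keys := by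
    rw [hkA, hkB, hkI]
    simp [PySem.List.map_snd_enumerate, PySem.Dict.keys_empty, PySem.Set.update_nil_left, gi_update_self]
  have hgetD : ∀ c, ((PySem.List.enumerate l).foldl (fun d p => d.modify p.2 [] (fun v => v ++ [p.1]))
      (l.foldl (fun d word => d.insert word ([] : List Int)) PySem.Dict.empty)).getD c []
      = ((PySem.List.enumerate l).foldl (fun d p => d.modify p.2 [] (fun v => v ++ [p.1]))
      (PySem.Dict.empty : PySem.Dict String (List Int))).getD c [] := by
    intro c
    have hswap : ∀ (d : PySem.Dict String (List Int)),
        (PySem.List.enumerate l).foldl (fun d p => d.modify p.2 [] (fun v => v ++ [p.1])) d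
        = ((PySem.List.enumerate l).map Prod.swap).foldl (fun d p => d.modify p.1 [] (fun v => v ++ [p.2])) d := by
      intro d; rw [List.foldl_map]; rfl
    rw [hswap, hswap, PySem.Dict.getD_foldl_modify_append, PySem.Dict.getD_foldl_modify_append,
        hinit c, PySem.Dict.getD_empty]
  apply PySem.Dict.ext
  rw [PySem.Dict.items_eq_map_keys _ hndA ([] : List Int), PySem.Dict.items_eq_map_keys _ hndB ([] : List Int), hkeys]
  apply List.map_congr_left
  intro k _
  rw [hgetD k]

-- the enumerate-modify dict looks up to exactly B's comprehension
theorem gi_getD_build (l : List String) (w : String) :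
    ((PySem.List.enumerate l).foldl (fun d p => d.modify p.2 [] (fun v => v ++ [p.1]))
      (PySem.Dict.empty : PySem.Dict String (List Int))).getD w [] = giOcc l w := by
  have hswap :
      (PySem.List.enumerate l).foldl (fun d p => d.modify p.2 [] (fun v => v ++ [p.1]))
        (PySem.Dict.empty : PySem.Dict String (List Int))
      = ((PySem.List.enumerate l).map Prod.swap).foldl (fun d p => d.modify p.1 [] (fun v => v ++ [p.2]))
        PySem.Dict.empty := by
    rw [List.foldl_map]; rfl
  rw [hswap, PySem.Dict.getD_foldl_modify_append, PySem.Dict.getD_empty]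
  simp only [List.nil_append, giOcc]
  induction (PySem.List.enumerate l) with
  | nil => rfl
  | cons p t ih =>
    cases p with
    | mk i x =>
      by_cases h : x = w
      · subst h; simp [ih]
      · simp [h, ih]

theorem gi_keys_build (l : List String) :
    ((PySem.List.enumerate l).foldl (fun d p => d.modify p.2 [] (fun v => v ++ [p.1]))
      (PySem.Dict.empty : PySem.Dict String (List Int))).keys = PySem.Set.ofList l := by
  rw [PySem.Dict.keys_foldl_modify_key (PySem.List.enumerate l) (fun p => p.2) []
      (fun _ p v => v ++ [p.1]) _]
  simp [PySem.List.map_snd_enumerate, PySem.Dict.keys_empty, PySem.Set.update_nil_left]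

theorem gi_inner (word : String) (idxs : List Int) :
    ∀ (v : List Int) (d2 : PySem.Dict String (List Int)) (m : PySem.Dict Int Int × PySem.Dict Int Int),
      d2.getD word [] = v → d2.contains word = true →
      (idxs.foldl
          (fun st idx1 =>
            match st.1.getD word [] with
            | [] => st
            | idx2 :: rest => (st.1.insert word rest, st.2.1.insert idx1 idx2, st.2.2.insert idx2 idx1))
          ((d2, m) : PySem.Dict String (List Int) × PySem.Dict Int Int × PySem.Dict Int Int)).2
        = (idxs.zip v).foldl (fun m ij => (m.1.insert ij.1 ij.2, m.2.insert ij.2 ij.1)) m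
      ∧ (∀ w', w' ≠ word →
          (idxs.foldl
            (fun st idx1 =>
              match st.1.getD word [] with
              | [] => st
              | idx2 :: rest => (st.1.insert word rest, st.2.1.insert idx1 idx2, st.2.2.insert idx2 idx1))
            ((d2, m))).1.getD w' [] = d2.getD w' [])
      ∧ (∀ w',
          (idxs.foldl
            (fun st idx1 =>
              match st.1.getD word [] with
              | [] => st
              | idx2 :: rest => (st.1.insert word rest, st.2.1.insert idx1 idx2, st.2.2.insert idx2 idx1))
            ((d2, m))).1.contains w' = d2.contains w') := by
  induction idxs with
  | nil => intro v d2 m hv hc; exact ⟨by simp, fun _ _ => rfl, fun _ => rfl⟩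
  | cons idx rest ih =>
    intro v d2 m hv hc
    cases v with
    | nil =>
      simp only [List.foldl_cons, hv]
      obtain ⟨h1, h2, h3⟩ := ih [] d2 m hv hc
      exact ⟨by simpa using h1, h2, h3⟩
    | cons j vt =>
      simp only [List.foldl_cons, hv]
      obtain ⟨h1, h2, h3⟩ := ih vt (d2.insert word vt) (m.1.insert idx j, m.2.insert j idx)
        (PySem.Dict.getD_insert_self _ _ _ _) (PySem.Dict.contains_insert_self _ _ _)
      refine ⟨by simpa using h1, ?_, ?_⟩
      · intro w' hw'
        rw [h2 w' hw']; simp [PySem.Dict.getD_insert, hw']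
      · intro w'
        rw [h3 w', PySem.Dict.contains_insert]
        by_cases hww : w' = word
        · subst hww; simp [hc]
        · simp [hww]

theorem gi_outer (pos1 pos2 : PySem.Dict String (List Int)) :
    ∀ (ks : List String), ks.Nodup →
    ∀ (d2 : PySem.Dict String (List Int)) (m : PySem.Dict Int Int × PySem.Dict Int Int),
      (∀ w ∈ ks, d2.getD w [] = pos2.getD w []) →
      (∀ w', d2.contains w' = pos2.contains w') →
      (ks.foldl
          (fun (st : PySem.Dict String (List Int) × PySem.Dict Int Int × PySem.Dict Int Int) word =>
            if st.1.contains word then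
              (pos1.getD word []).foldl
                (fun st idx1 =>
                  match st.1.getD word [] with
                  | [] => st
                  | idx2 :: rest => (st.1.insert word rest, st.2.1.insert idx1 idx2, st.2.2.insert idx2 idx1))
                st
            else st)
          (d2, m)).2
      = ks.foldl
          (fun m w =>
            ((pos1.getD w []).zip (pos2.getD w [])).foldl
              (fun m ij => (m.1.insert ij.1 ij.2, m.2.insert ij.2 ij.1)) m)
          m := by
  intro ks
  induction ks with
  | nil => intro _ d2 m _ _; rfl
  | cons w ks ih =>
    intro hnd d2 m hgd hcon
    obtain ⟨hw, hks⟩ := List.nodup_cons.mp hnd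
    by_cases hc : d2.contains w = true
    · simp only [List.foldl_cons, hc, if_true]
      obtain ⟨h1, h2, h3⟩ := gi_inner w (pos1.getD w []) (pos2.getD w []) d2 m (hgd w (by simp)) hc
      rw [← h1]
      have ihh := ih hks
        ((pos1.getD w []).foldl
          (fun st idx1 =>
            match st.1.getD w [] with
            | [] => st
            | idx2 :: rest => (st.1.insert w rest, st.2.1.insert idx1 idx2, st.2.2.insert idx2 idx1))
          ((d2, m))).1
        ((pos1.getD w []).foldl
          (fun st idx1 =>
            match st.1.getD w [] with
            | [] => st
            | idx2 :: rest => (st.1.insert w rest, st.2.1.insert idx1 idx2, st.2.2.insert idx2 idx1))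
          ((d2, m))).2
        (by
          intro u hu
          have hne : u ≠ w := fun h => hw (h ▸ hu)
          rw [h2 u hne]
          exact hgd u (List.mem_cons_of_mem _ hu))
        (by
          intro u
          rw [h3 u]
          exact hcon u)
      exact ihh
    · simp only [List.foldl_cons, hc, if_false, Bool.false_eq_true]
      have hp2 : pos2.contains w = false := by
        rw [← hcon w]; exact eq_false_of_ne_true hc
      have hz : pos2.getD w [] = [] := PySem.Dict.getD_of_not_contains _ _ hp2
      rw [hz]
      simp only [List.zip_nil_right, List.foldl_nil]
      exact ih hks d2 m (fun u hu => hgd u (List.mem_cons_of_mem _ hu)) hcon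

-- the distinct new words B's seen-set pass visits, in order
def giFresh (seen : List String) : List String → List String
  | [] => []
  | w :: t => if seen.contains w then giFresh seen t else w :: giFresh (seen ++ [w]) t

theorem gi_update_fresh (l : List String) :
    ∀ seen : List String, PySem.Set.update seen l = seen ++ giFresh seen l := by
  induction l with
  | nil => intro seen; simp [PySem.Set.update, giFresh]
  | cons w t ih =>
    intro seen
    have hmem : seen.contains w = true ↔ w ∈ seen := by simp
    by_cases h : seen.contains w
    · have hadd : PySem.Set.add seen w = seen := by
        simp [PySem.Set.add, hmem.mp h]
      show PySem.Set.update (PySem.Set.add seen w) t = _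
      rw [hadd, ih seen]
      simp [giFresh, hmem.mp h]
    · have hadd : PySem.Set.add seen w = seen ++ [w] := by
        have : ¬ w ∈ seen := fun hm => h (hmem.mpr hm)
        simp [PySem.Set.add, this]
      have hnm : w ∉ seen := fun hm => h (hmem.mpr hm)
      show PySem.Set.update (PySem.Set.add seen w) t = _
      rw [hadd, ih (seen ++ [w])]
      simp [giFresh, hnm]

theorem gi_fresh_nil (l : List String) : giFresh [] l = PySem.Set.ofList l := by
  have h := gi_update_fresh l []
  simp only [List.nil_append] at h
  rw [← h]
  simp [PySem.Set.update, PySem.Set.ofList_eq_foldl]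

-- B's seen-set fold computes the body over exactly the fresh words
theorem gi_seen_fold (body : String → PySem.Dict Int Int × PySem.Dict Int Int → PySem.Dict Int Int × PySem.Dict Int Int) :
    ∀ (l : List String) (seen : PySem.Set String) (m : PySem.Dict Int Int × PySem.Dict Int Int),
      (l.foldl
          (fun (st : PySem.Set String × PySem.Dict Int Int × PySem.Dict Int Int) word =>
            if PySem.Set.contains st.1 word then st
            else (PySem.Set.add st.1 word, body word st.2))
          (seen, m)).2
      = (giFresh seen l).foldl (fun m w => body w m) m := by
  intro l
  induction l with
  | nil => intro seen m; rfl
  | cons w t ih =>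
    intro seen m
    have hmem : (seen : List String).contains w = true ↔ w ∈ seen := by simp
    by_cases h : PySem.Set.contains seen w
    · have hl : (seen : List String).contains w = true := by
        simpa [PySem.Set.contains] using h
      have hg : giFresh seen (w :: t) = giFresh seen t := by
        simp [giFresh, hmem.mp h]
      simp only [List.foldl_cons, h, if_true, hg]
      exact ih seen m
    · have hl : (seen : List String).contains w = false := by
        have : ¬ w ∈ seen := by
          intro hm
          exact h (by simpa [PySem.Set.contains] using hmem.mpr hm)
        simpa using this
      have hnm : w ∉ seen := by simpa using hl
      have hg : giFresh seen (w :: t) = w :: giFresh (seen ++ [w]) t := by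
        simp [giFresh, hnm]
      have hadd : PySem.Set.add seen w = seen ++ [w] := by
        simp [PySem.Set.add, hnm]
      simp only [List.foldl_cons, h, if_false, Bool.false_eq_true, hg, hadd]
      exact ih (seen ++ [w]) (body w m)

-- ===== VERDICT (by name: the statement is the Claim_ definition above) =====
theorem gen_indexes_spec : Claim_equal_gen_indexes := by
  intro list1 list2 _
  show gen_indexes list1 list2 = gen_indexes_alt list1 list2
  simp only [gen_indexes, gen_indexes_alt]
  rw [gi_build_eq list1, gi_build_eq list2]
  rw [gi_outer _ _ _ (by
        rw [gi_keys_build list1]; exact PySem.Set.nodup_ofList list1) _ _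
      (fun w _ => rfl) (fun w => rfl)]
  rw [gi_seen_fold (fun word m =>
      ((((PySem.List.enumerate list1).filterMap (fun p => if p.2 == word then some p.1 else none)).zip
        ((PySem.List.enumerate list2).filterMap (fun p => if p.2 == word then some p.1 else none))).foldl
        (fun m ij => (m.1.insert ij.1 ij.2, m.2.insert ij.2 ij.1)) m)) list1 PySem.Set.empty
      (PySem.Dict.empty, PySem.Dict.empty)]
  simp only [gi_getD_build, ← giOcc_def]
  rw [gi_keys_build list1,
      show (PySem.Set.empty : PySem.Set String) = ([] : List String) from rfl,
      gi_fresh_nil list1]
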